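-- pv_equiv track=rewrite | github.com/McRavenberry/Class-Adventure-Game | functions.py | remove_fog
-- ===== SOURCE A (Python) =====
-- def remove_fog(map, items, location: list) -> list:
--     """Pass the map and the coordinate of the player as a list. Returns a map with the fog of war removed for the 3x3 grid around the player."""
--     row, col = location
--     clist = []
--
--     # Finds the 3x3 grid around the player's location
--     for i in range(3):
--         for j in range(3):
--             if [row-1+i,col-1+j] not in clist:
--                 clist.append([row-1+i,col-1+j])
--
--     # Converts the map into a list of lists
--     new_map = []
--     for row in map:
--         new_map.append(list(row))
--
--     # Removes the fog of war from the map
--     for i, row in enumerate(new_map):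
--         for j, col in enumerate(row):
--             if new_map[i][j] == "/" and [i, j] in clist:
--                 new_map[i][j] = " "
--
--     # Adds items onto map if discovered
--     for item in items:
--         locations = items[item]
--         # Adds player to fog_world at location
--         if item == "P":
--             row, col = locations[0]
--             new_map[row][col] = "P"
--
--         # Adds other items to the map if discovered
--         else:
--             for i in range(len(locations)):
--                 row, col = locations[i]
--                 if new_map[row][col] not in "#/P":
--                     new_map[row][col] = item
--     # Coverts the list back into a string
--     map = []
--     for row in new_map:
--         temp = "".join(row)
--         map.append(temp)
--
--     return map
-- ===== SOURCE B (Python) =====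
-- def remove_fog(map, items, location: list) -> list:
--     """Reveal the 3x3 grid around the player and place discovered items, then
--     return the map as a list of strings."""
--     row, col = location
--     grid = [list(r) for r in map]
--
--     # Reveal: touch only the (at most) nine cells around the player.
--     for di in range(3):
--         for dj in range(3):
--             r = row - 1 + di
--             c = col - 1 + dj
--             if 0 <= r < len(grid) and 0 <= c < len(grid[r]) and grid[r][c] == "/":
--                 grid[r][c] = " "
--
--     # Place items (player unconditionally, others only on open ground).
--     for item, locations in items.items():
--         if item == "P":
--             r, c = locations[0]
--             grid[r][c] = "P"
--         else:
--             for r, c in locations: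
--                 if grid[r][c] not in "#/P":
--                     grid[r][c] = item
--
--     return ["".join(r) for r in grid]
-- ===== Notes on version B (the rewrite author's own statement) =====
-- stated objective: simpler
-- what changed: The fog pass no longer builds the clist of nine coordinates and scans the whole map testing each cell for list membership; B directly visits the at-most-nine cells around the player with bounds guards, and the grid conversion/join use comprehensions and dict.items() unpacking instead of index loops.
import Mathlib
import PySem

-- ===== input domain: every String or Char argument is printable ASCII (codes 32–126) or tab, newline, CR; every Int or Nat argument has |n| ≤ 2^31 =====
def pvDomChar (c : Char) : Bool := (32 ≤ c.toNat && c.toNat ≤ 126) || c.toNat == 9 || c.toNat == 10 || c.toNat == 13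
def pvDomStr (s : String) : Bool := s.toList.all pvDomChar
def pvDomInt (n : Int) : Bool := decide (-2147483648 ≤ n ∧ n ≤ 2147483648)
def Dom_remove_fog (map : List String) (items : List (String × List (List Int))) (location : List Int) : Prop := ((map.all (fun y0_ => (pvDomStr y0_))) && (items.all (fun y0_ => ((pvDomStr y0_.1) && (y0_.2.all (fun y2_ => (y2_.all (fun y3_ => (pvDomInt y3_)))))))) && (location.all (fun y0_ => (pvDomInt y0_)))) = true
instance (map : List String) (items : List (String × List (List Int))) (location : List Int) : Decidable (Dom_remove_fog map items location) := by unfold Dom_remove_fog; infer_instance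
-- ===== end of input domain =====

-- B replaces A's fog pass (build a 9-coordinate list, then scan every map cell testing list
-- membership) by direct guarded updates of the at-most-nine cells around the player; objective:
-- simpler. Cells are kept as List Char because Python may store a multi-character item string in a cell.

-- ===== PORT A =====
def remove_fog (map : List String) (items : List (String × List (List Int))) (location : List Int) : List String :=
  -- row, col = location  (raises unless len(location) == 2: excluded by Pre_)
  let row := PySem.List.pyGetD location 0 0
  let col := PySem.List.pyGetD location 1 0
  -- clist: the 3x3 grid of coordinates around the player, built with a membership check
  let clist : List (List Int) :=
    (PySem.List.pyRange 0 3 1).foldl (fun cl i =>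
      (PySem.List.pyRange 0 3 1).foldl (fun cl j =>
        if [row - 1 + i, col - 1 + j] ∈ cl then cl else cl ++ [[row - 1 + i, col - 1 + j]]) cl) []
  -- new_map: list of lists (each cell a Python string, here a List Char)
  let new_map : List (List (List Char)) :=
    map.foldl (fun nm r => nm ++ [r.toList.map (fun ch => [ch])]) []
  -- fog removal: scan every cell, test membership in clist
  let new_map :=
    (PySem.List.enumerate new_map).map (fun p =>
      (PySem.List.enumerate p.2).map (fun q =>
        if q.2 = ['/'] ∧ [p.1, q.1] ∈ clist then [' '] else q.2))
  -- item placement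
  let new_map := items.foldl (fun nm p =>
    if p.1 = "P" then
      let loc := PySem.List.pyGetD p.2 0 []
      let r := PySem.List.pyGetD loc 0 0
      let c := PySem.List.pyGetD loc 1 0
      let rowL := PySem.List.pyGetD nm r []
      PySem.List.pySetD nm r (PySem.List.pySetD rowL c ['P'])
    else
      (PySem.List.pyRange 0 (p.2.length : Int) 1).foldl (fun nm i =>
        let loc := PySem.List.pyGetD p.2 i []
        let r := PySem.List.pyGetD loc 0 0
        let c := PySem.List.pyGetD loc 1 0
        let rowL := PySem.List.pyGetD nm r []
        if PySem.Chars.isIn (PySem.List.pyGetD rowL c []) ['#', '/', 'P'] then nm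
        else PySem.List.pySetD nm r (PySem.List.pySetD rowL c p.1.toList)) nm) new_map
  -- join back into strings
  new_map.foldl (fun acc r => acc ++ [String.ofList (PySem.Chars.join [] r)]) []

-- ===== PORT B =====
def remove_fog_alt (map : List String) (items : List (String × List (List Int))) (location : List Int) : List String :=
  let row := PySem.List.pyGetD location 0 0
  let col := PySem.List.pyGetD location 1 0
  let grid : List (List (List Char)) := map.map (fun r => r.toList.map (fun ch => [ch]))
  -- reveal only the at-most-nine cells around the player, with bounds guards
  let grid :=
    (PySem.List.pyRange 0 3 1).foldl (fun g di =>
      (PySem.List.pyRange 0 3 1).foldl (fun g dj =>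
        let r := row - 1 + di
        let c := col - 1 + dj
        if 0 ≤ r ∧ r < (g.length : Int) ∧ 0 ≤ c ∧ c < ((PySem.List.pyGetD g r []).length : Int) ∧
            PySem.List.pyGetD (PySem.List.pyGetD g r []) c [] = ['/'] then
          PySem.List.pySetD g r (PySem.List.pySetD (PySem.List.pyGetD g r []) c [' '])
        else g) g) grid
  -- item placement
  let grid := items.foldl (fun g p =>
    if p.1 = "P" then
      let loc := PySem.List.pyGetD p.2 0 []
      let r := PySem.List.pyGetD loc 0 0
      let c := PySem.List.pyGetD loc 1 0
      let rowL := PySem.List.pyGetD g r []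
      PySem.List.pySetD g r (PySem.List.pySetD rowL c ['P'])
    else
      p.2.foldl (fun g loc =>
        let r := PySem.List.pyGetD loc 0 0
        let c := PySem.List.pyGetD loc 1 0
        let rowL := PySem.List.pyGetD g r []
        if PySem.Chars.isIn (PySem.List.pyGetD rowL c []) ['#', '/', 'P'] then g
        else PySem.List.pySetD g r (PySem.List.pySetD rowL c p.1.toList)) g) grid
  grid.map (fun r => String.ofList (PySem.Chars.join [] r))

-- ===== PRECONDITION & SPEC =====
-- a single item coordinate [r, c]: exactly two entries, both in Python index range for the map
def pvOkLoc (map : List String) (loc : List Int) : Bool :=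
  match loc with
  | [r, c] =>
    match PySem.List.pyGet? map r with
    | some s => decide (PySem.Raise.InRange s.toList.length c)
    | none => false
  | _ => false

-- Pre_: exactly where Python A returns (outside it Python raises ValueError/IndexError). The Lean
-- ports are total and proved equal on all inputs, so the proof does not need the hypothesis;
-- Pre_ delimits where the ports are faithful to the Pythons.
-- Exactly where Python A returns: location unpacks to two ints, and every item coordinate
-- that A indexes with (the first one for "P", all of them otherwise) is a valid [r, c] pair.
def pvHeadOk (map : List String) (ls : List (List Int)) : Bool :=
  match ls with
  | l0 :: _ => pvOkLoc map l0
  | [] => false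

def Pre_remove_fog (map : List String) (items : List (String × List (List Int))) (location : List Int) : Prop :=
  (location.length = 2 ∧
  ∀ p ∈ items,
    if p.1 = "P" then pvHeadOk map p.2 = true
    else ∀ loc ∈ p.2, pvOkLoc map loc = true)

instance (map : List String) (items : List (String × List (List Int))) (location : List Int) : Decidable (Pre_remove_fog map items location) := by
  unfold Pre_remove_fog; infer_instance

def pvWitness_remove_fog : List String × (List (String × List (List Int))) × List Int :=
  (["//#", "/./"], [("P", [[0, 0]]), ("T", [[1, 2]])], [1, 1])

def Spec_remove_fog (map : List String) (items : List (String × List (List Int))) (location : List Int) (out : List String) : Prop := out = remove_fog_alt map items location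
instance (map : List String) (items : List (String × List (List Int))) (location : List Int) (out : List String) : Decidable (Spec_remove_fog map items location out) := by unfold Spec_remove_fog; infer_instance

-- ===== CLAIM (what is proved, stated in full; the proofs are below) =====
def Claim_equal_remove_fog : Prop := ∀ (map : List String) (items : List (String × List (List Int))) (location : List Int), Dom_remove_fog map items location → Pre_remove_fog map items location → Spec_remove_fog map items location (remove_fog map items location)

-- ===== LEMMAS AND PROOFS =====

-- proof-only helpers -----------------------------------------------------------------------

-- fog a grid at exactly the positions satisfying P
def pvFog (P : Nat → Nat → Prop) [inst : ∀ i j, Decidable (P i j)] (g : List (List (List Char))) : List (List (List Char)) :=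
  g.mapIdx (fun i r => r.mapIdx (fun j cell => if cell = ['/'] ∧ P i j then [' '] else cell))

-- one guarded single-cell update (B's fog step)
def pvStep (g : List (List (List Char))) (r c : Int) : List (List (List Char)) :=
  if 0 ≤ r ∧ r < (g.length : Int) ∧ 0 ≤ c ∧ c < ((PySem.List.pyGetD g r []).length : Int) ∧
      PySem.List.pyGetD (PySem.List.pyGetD g r []) c [] = ['/'] then
    PySem.List.pySetD g r (PySem.List.pySetD (PySem.List.pyGetD g r []) c [' '])
  else g

theorem pvGrid_ext (g1 g2 : List (List (List Char))) (hL : g1.length = g2.length)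
    (hR : ∀ i (h1 : i < g1.length) (h2 : i < g2.length), g1[i].length = g2[i].length)
    (hC : ∀ i j (hi1 : i < g1.length) (hi2 : i < g2.length) (hj1 : j < g1[i].length) (hj2 : j < g2[i].length), g1[i][j] = g2[i][j]) :
    g1 = g2 := by
  apply List.ext_getElem hL
  intro i h1 h2
  exact List.ext_getElem (hR i h1 h2) (fun j hj1 hj2 => hC i j h1 h2 hj1 hj2)

theorem pvFog_congr (P Q : Nat → Nat → Prop) [∀ i j, Decidable (P i j)] [∀ i j, Decidable (Q i j)]
    (g : List (List (List Char))) (h : ∀ i j, P i j ↔ Q i j) : pvFog P g = pvFog Q g := by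
  refine pvGrid_ext _ _ (by simp [pvFog]) (by intro i h1 h2; simp [pvFog]) ?_
  intro i j hi1 hi2 hj1 hj2
  have hi : i < g.length := by simpa [pvFog] using hi1
  have hj : j < (g[i]'hi).length := by simpa [pvFog] using hj1
  simp only [pvFog, List.getElem_mapIdx]
  by_cases hc : g[i][j] = ['/'] ∧ P i j
  · rw [if_pos hc, if_pos ⟨hc.1, (h i j).mp hc.2⟩]
  · rw [if_neg hc, if_neg (by rw [h i j] at hc; exact hc)]

theorem pvFog_false (g : List (List (List Char))) : pvFog (fun _ _ => False) g = g := by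
  refine pvGrid_ext _ _ (by simp [pvFog]) (by intro i h1 h2; simp [pvFog]) ?_
  intro i j hi1 hi2 hj1 hj2
  simp [pvFog]

theorem pvFog_pvFog (P Q : Nat → Nat → Prop) [∀ i j, Decidable (P i j)] [∀ i j, Decidable (Q i j)]
    (g : List (List (List Char))) :
    pvFog P (pvFog Q g) = pvFog (fun i j => Q i j ∨ P i j) g := by
  refine pvGrid_ext _ _ (by simp [pvFog]) (by intro i h1 h2; simp [pvFog]) ?_
  intro i j hi1 hi2 hj1 hj2
  have hi : i < g.length := by simpa [pvFog] using hi2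
  have hj : j < (g[i]'hi).length := by simpa [pvFog] using hj2
  simp only [pvFog, List.getElem_mapIdx]
  by_cases hq : Q i j <;> by_cases hp : P i j <;> by_cases hc : g[i][j] = ['/'] <;>
    simp [hq, hp, hc]

theorem pv_map_enumerate {α β : Type} (xs : List α) (s : Int) (F : Int × α → β) :
    (PySem.List.enumerate xs s).map F = xs.mapIdx (fun i a => F (s + (i : Int), a)) := by
  induction xs generalizing s with
  | nil => simp [PySem.List.enumerate_nil]
  | cons x xs ih =>
    rw [PySem.List.enumerate_cons, List.map_cons, List.mapIdx_cons, ih]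
    simp only [Nat.cast_zero, Int.add_zero]
    congr 1
    apply List.mapIdx_eq_mapIdx_iff.mpr
    intro i hlt
    congr 2
    push_cast
    ring


theorem pvStep_eq_pvFog (g : List (List (List Char))) (r c : Int) :
    pvStep g r c = pvFog (fun i j => (i : Int) = r ∧ (j : Int) = c) g := by
  by_cases hg : 0 ≤ r ∧ r < (g.length : Int) ∧ 0 ≤ c ∧ c < ((PySem.List.pyGetD g r []).length : Int) ∧
      PySem.List.pyGetD (PySem.List.pyGetD g r []) c [] = ['/']
  · obtain ⟨hr0, hr1, hc0, hc1, hcell⟩ := hg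
    rw [pvStep, if_pos ⟨hr0, hr1, hc0, hc1, hcell⟩]
    have hrn : r.toNat < g.length := by omega
    have hgr : PySem.List.pyGetD g r [] = g[r.toNat] := PySem.List.pyGetD_eq_getElem g [] hr0 hr1
    rw [hgr] at hc1 hcell
    have hcn : c.toNat < g[r.toNat].length := by omega
    have hgc : PySem.List.pyGetD g[r.toNat] c [] = g[r.toNat][c.toNat] :=
      PySem.List.pyGetD_eq_getElem g[r.toNat] [] hc0 hc1
    rw [hgc] at hcell  -- hcell : g[r.toNat][c.toNat] = ['/']
    rw [hgr, PySem.List.pySetD_of_nonneg _ _ hc0, PySem.List.pySetD_of_nonneg _ _ hr0]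
    refine pvGrid_ext _ _ (by simp [pvFog]) (by intro i h1 h2; simp [pvFog, List.getElem_set]; split <;> simp_all) ?_
    intro i j hi1 hi2 hj1 hj2
    have hi : i < g.length := by simpa using hi1
    have hj : j < (g[i]'hi).length := by
      rw [List.getElem_set] at hj1
      split at hj1
      · next heq => subst heq; simpa using hj1
      · exact hj1
    simp only [pvFog, List.getElem_mapIdx]
    rcases eq_or_ne i r.toNat with h | h
    · subst h
      rcases eq_or_ne j c.toNat with h2 | h2
      · subst h2
        have e1 : ((r.toNat : Int)) = r := by omega
        have e2 : ((c.toNat : Int)) = c := by omega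
        simp [hcell, e1, e2]
      · have e3 : ¬((j : Int) = c) := by omega
        simp [Ne.symm h2, e3]
    · have e4 : ¬((i : Int) = r) := by omega
      simp [Ne.symm h, e4]
  · rw [pvStep, if_neg hg]
    refine (pvGrid_ext _ _ (by simp [pvFog]) (by intro i h1 h2; simp [pvFog]) ?_).symm
    intro i j hi1 hi2 hj1 hj2
    have hi : i < g.length := by simpa [pvFog] using hi1
    have hj : j < (g[i]'hi).length := by simpa [pvFog] using hj1
    simp only [pvFog, List.getElem_mapIdx]
    rw [if_neg]
    rintro ⟨hcell, hir, hjc⟩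
    apply hg
    have hgr : PySem.List.pyGetD g r [] = g[i] := by
      rw [← hir]; simp [PySem.List.pyGetD_natCast, List.getD_eq_getElem?_getD, hi]
    refine ⟨by omega, by omega, by omega, ?_, ?_⟩
    · rw [hgr]; omega
    · rw [hgr, ← hjc]
      simpa [PySem.List.pyGetD_natCast, List.getD_eq_getElem?_getD, hj] using hcell

theorem pv_mem_foldl {α β : Type} (P : β → α → Prop) (step : List α → β → List α)
    (hstep : ∀ cl e x, x ∈ step cl e ↔ x ∈ cl ∨ P e x) (l : List β) (acc : List α) (x : α) :
    x ∈ l.foldl step acc ↔ x ∈ acc ∨ ∃ e ∈ l, P e x := by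
  induction l generalizing acc with
  | nil => simp
  | cons e l ih =>
    rw [List.foldl_cons, ih, hstep]
    constructor
    · rintro ((h | h) | ⟨e', he', h⟩)
      · exact Or.inl h
      · exact Or.inr ⟨e, List.mem_cons_self, h⟩
      · exact Or.inr ⟨e', List.mem_cons_of_mem _ he', h⟩
    · rintro (h | ⟨e', he', h⟩)
      · exact Or.inl (Or.inl h)
      · rcases List.mem_cons.mp he' with rfl | he'
        · exact Or.inl (Or.inr h)
        · exact Or.inr ⟨e', he', h⟩

theorem pv_mem_dedup_step {α : Type} (cl : List α) (e x : α) {d : Decidable (e ∈ cl)} :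
    x ∈ (@ite _ (e ∈ cl) d cl (cl ++ [e])) ↔ x ∈ cl ∨ x = e := by
  split
  · next h =>
    constructor
    · exact Or.inl
    · rintro (h' | rfl) <;> assumption
  · simp

theorem pv_mem_clist (row col : Int) (x : List Int) :
    x ∈ (PySem.List.pyRange 0 3 1).foldl (fun cl i =>
      (PySem.List.pyRange 0 3 1).foldl (fun cl j =>
        if [row - 1 + i, col - 1 + j] ∈ cl then cl else cl ++ [[row - 1 + i, col - 1 + j]]) cl) ([] : List (List Int))
    ↔ ∃ i ∈ PySem.List.pyRange 0 3 1, ∃ j ∈ PySem.List.pyRange 0 3 1, x = [row - 1 + i, col - 1 + j] := by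
  rw [pv_mem_foldl (fun i x => ∃ j ∈ PySem.List.pyRange 0 3 1, x = [row - 1 + i, col - 1 + j])]
  · simp
  · intro cl e x
    rw [pv_mem_foldl (fun j x => x = [row - 1 + e, col - 1 + j])]
    intro cl' e' x'
    exact pv_mem_dedup_step cl' _ x'

theorem pvFoldFog (P : Int → Nat → Nat → Prop) [∀ e i j, Decidable (P e i j)]
    (step : List (List (List Char)) → Int → List (List (List Char)))
    (hstep : ∀ g e, step g e = pvFog (P e) g) (l : List Int) (g : List (List (List Char))) :
    l.foldl step g = pvFog (fun i j => ∃ e ∈ l, P e i j) g := by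
  induction l generalizing g with
  | nil =>
    simp only [List.foldl_nil]
    rw [pvFog_congr _ (fun _ _ => False) g (by simp), pvFog_false]
  | cons e l ih =>
    rw [List.foldl_cons, ih, hstep, pvFog_pvFog]
    apply pvFog_congr
    intro i j
    constructor
    · rintro (h | ⟨e', he', h⟩)
      · exact ⟨e, List.mem_cons_self, h⟩
      · exact ⟨e', List.mem_cons_of_mem _ he', h⟩
    · rintro ⟨e', he', h⟩
      rcases List.mem_cons.mp he' with rfl | he'
      · exact Or.inl h
      · exact Or.inr ⟨e', he', h⟩


-- the two fog passes agree on every grid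
theorem pv_fog_eq (row col : Int) (g : List (List (List Char))) :
    (PySem.List.enumerate g).map (fun p =>
      (PySem.List.enumerate p.2).map (fun q =>
        if q.2 = ['/'] ∧ [p.1, q.1] ∈ (PySem.List.pyRange 0 3 1).foldl (fun cl i =>
            (PySem.List.pyRange 0 3 1).foldl (fun cl j =>
              if [row - 1 + i, col - 1 + j] ∈ cl then cl else cl ++ [[row - 1 + i, col - 1 + j]]) cl) []
        then [' '] else q.2))
    = (PySem.List.pyRange 0 3 1).foldl (fun g di =>
        (PySem.List.pyRange 0 3 1).foldl (fun g dj =>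
          let r := row - 1 + di
          let c := col - 1 + dj
          if 0 ≤ r ∧ r < (g.length : Int) ∧ 0 ≤ c ∧ c < ((PySem.List.pyGetD g r []).length : Int) ∧
              PySem.List.pyGetD (PySem.List.pyGetD g r []) c [] = ['/'] then
            PySem.List.pySetD g r (PySem.List.pySetD (PySem.List.pyGetD g r []) c [' '])
          else g) g) g := by
  have hrhs : (PySem.List.pyRange 0 3 1).foldl (fun g di =>
        (PySem.List.pyRange 0 3 1).foldl (fun g dj => pvStep g (row - 1 + di) (col - 1 + dj)) g) g
      = pvFog (fun i j => ∃ di ∈ PySem.List.pyRange 0 3 1, ∃ dj ∈ PySem.List.pyRange 0 3 1,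
          (i : Int) = row - 1 + di ∧ (j : Int) = col - 1 + dj) g := by
    apply pvFoldFog
    intro g e
    apply pvFoldFog
    intro g e'
    exact pvStep_eq_pvFog g _ _
  rw [show (PySem.List.pyRange 0 3 1).foldl (fun g di =>
        (PySem.List.pyRange 0 3 1).foldl (fun g dj =>
          let r := row - 1 + di
          let c := col - 1 + dj
          if 0 ≤ r ∧ r < (g.length : Int) ∧ 0 ≤ c ∧ c < ((PySem.List.pyGetD g r []).length : Int) ∧
              PySem.List.pyGetD (PySem.List.pyGetD g r []) c [] = ['/'] then
            PySem.List.pySetD g r (PySem.List.pySetD (PySem.List.pyGetD g r []) c [' '])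
          else g) g) g
      = (PySem.List.pyRange 0 3 1).foldl (fun g di =>
        (PySem.List.pyRange 0 3 1).foldl (fun g dj => pvStep g (row - 1 + di) (col - 1 + dj)) g) g from rfl,
    hrhs]
  simp only [pv_map_enumerate, zero_add]
  rw [show (g.mapIdx fun i a =>
        List.mapIdx (fun i_1 a_1 =>
          if a_1 = ['/'] ∧ [(i : Int), (i_1 : Int)] ∈ (PySem.List.pyRange 0 3 1).foldl (fun cl i =>
              (PySem.List.pyRange 0 3 1).foldl (fun cl j =>
                if [row - 1 + i, col - 1 + j] ∈ cl then cl else cl ++ [[row - 1 + i, col - 1 + j]]) cl) []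
          then [' '] else a_1) a)
      = pvFog (fun i j => [(i : Int), (j : Int)] ∈ (PySem.List.pyRange 0 3 1).foldl (fun cl i =>
          (PySem.List.pyRange 0 3 1).foldl (fun cl j =>
            if [row - 1 + i, col - 1 + j] ∈ cl then cl else cl ++ [[row - 1 + i, col - 1 + j]]) cl) []) g from rfl]
  apply pvFog_congr
  intro i j
  rw [pv_mem_clist]
  constructor
  · rintro ⟨di, hdi, dj, hdj, h⟩
    simp only [List.cons.injEq, and_true] at h
    exact ⟨di, hdi, dj, hdj, h.1, h.2⟩
  · rintro ⟨di, hdi, dj, hdj, h1, h2⟩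
    exact ⟨di, hdi, dj, hdj, by rw [h1, h2]⟩

-- ===== VERDICT (by name: the statement is the Claim_ definition above) =====
theorem remove_fog_spec : Claim_equal_remove_fog := by
  intro map items location _ _
  unfold Spec_remove_fog
  simp only [remove_fog, remove_fog_alt]
  rw [PySem.List.foldl_append_singleton_eq_map
    (fun r : String => r.toList.map (fun ch => ([ch] : List Char))) map []]
  rw [List.nil_append]
  rw [pv_fog_eq]
  rw [show (fun (nm : List (List (List Char))) (p : String × List (List Int)) =>
      if p.1 = "P" then
        PySem.List.pySetD nm (PySem.List.pyGetD (PySem.List.pyGetD p.2 0 []) 0 0)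
          (PySem.List.pySetD (PySem.List.pyGetD nm (PySem.List.pyGetD (PySem.List.pyGetD p.2 0 []) 0 0) [])
            (PySem.List.pyGetD (PySem.List.pyGetD p.2 0 []) 1 0) ['P'])
      else
        (PySem.List.pyRange 0 (p.2.length : Int) 1).foldl (fun nm i =>
          let loc := PySem.List.pyGetD p.2 i []
          let r := PySem.List.pyGetD loc 0 0
          let c := PySem.List.pyGetD loc 1 0
          let rowL := PySem.List.pyGetD nm r []
          if PySem.Chars.isIn (PySem.List.pyGetD rowL c []) ['#', '/', 'P'] then nm
          else PySem.List.pySetD nm r (PySem.List.pySetD rowL c p.1.toList)) nm)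
    = (fun (nm : List (List (List Char))) (p : String × List (List Int)) =>
      if p.1 = "P" then
        PySem.List.pySetD nm (PySem.List.pyGetD (PySem.List.pyGetD p.2 0 []) 0 0)
          (PySem.List.pySetD (PySem.List.pyGetD nm (PySem.List.pyGetD (PySem.List.pyGetD p.2 0 []) 0 0) [])
            (PySem.List.pyGetD (PySem.List.pyGetD p.2 0 []) 1 0) ['P'])
      else
        p.2.foldl (fun nm loc =>
          let r := PySem.List.pyGetD loc 0 0
          let c := PySem.List.pyGetD loc 1 0
          let rowL := PySem.List.pyGetD nm r []
          if PySem.Chars.isIn (PySem.List.pyGetD rowL c []) ['#', '/', 'P'] then nm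
          else PySem.List.pySetD nm r (PySem.List.pySetD rowL c p.1.toList)) nm)
    from funext fun nm => funext fun p => by
      by_cases h : p.1 = "P"
      · simp only [h, if_pos]
      · simp only [if_neg h]
        exact PySem.List.foldl_pyRange_zero_pyGetD' p.2 []
          (fun nm loc =>
            if PySem.Chars.isIn (PySem.List.pyGetD (PySem.List.pyGetD nm (PySem.List.pyGetD loc 0 0) [])
                (PySem.List.pyGetD loc 1 0) []) ['#', '/', 'P'] then nm
            else PySem.List.pySetD nm (PySem.List.pyGetD loc 0 0)
              (PySem.List.pySetD (PySem.List.pyGetD nm (PySem.List.pyGetD loc 0 0) [])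
                (PySem.List.pyGetD loc 1 0) p.1.toList)) nm]
  rw [PySem.List.foldl_append_singleton_eq_map
    (fun r : List (List Char) => String.ofList (PySem.Chars.join [] r)) _ []]
  rw [List.nil_append]
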